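-- pv_equiv track=rewrite | github.com/HS980924/Algorithm | src/etc/src/04_19(화)/파일명정렬.py | solution
-- ===== SOURCE A (Python) =====
-- def solution(files):
--     answer = []
--     arr = []
--
--     for file in files:
--         head = ''
--         number = ''
--         tail = ''
--         for i in range(len(file)):
--             if file[i].isdigit():
--                 head = file[:i]
--                 number = file[i:]
--
--                 for j in range(len(number)):
--                     if not number[j].isdigit():
--                         tail = number[j:]
--                         number = number[:j]
--                         break
--                 arr.append([head,number,tail])
--                 break
--
--     sort_arr = sorted(arr, key=lambda x : (x[0].lower(), int(x[1])))
--
--     for x in sort_arr: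
--         tmp = "".join(x)
--         answer.append(tmp)
--
--     return answer
-- ===== SOURCE B (Python) =====
-- def solution(files):
--     parsed = []
--     for f in files:
--         head = ''
--         rest = f
--         while rest and not rest[0].isdigit():
--             head += rest[0]
--             rest = rest[1:]
--         if not rest:
--             continue
--         num = ''
--         while rest and rest[0].isdigit():
--             num += rest[0]
--             rest = rest[1:]
--         parsed.append((head.lower(), int(num), f))
--     parsed.sort(key=lambda t: (t[0], t[1]))
--     return [t[2] for t in parsed]
-- ===== Notes on version B (the rewrite author's own statement) =====
-- stated objective: simpler
-- what changed: A's two nested index loops with slicing (and a third pass re-joining head+number+tail) are replaced by a single left-to-right consumption of each filename that precomputes the sort key (lowered head, int(number)) and keeps the original string, so the output is the untouched filename after a decorate-sort-undecorate with no reconstruction step.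
import Mathlib
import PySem

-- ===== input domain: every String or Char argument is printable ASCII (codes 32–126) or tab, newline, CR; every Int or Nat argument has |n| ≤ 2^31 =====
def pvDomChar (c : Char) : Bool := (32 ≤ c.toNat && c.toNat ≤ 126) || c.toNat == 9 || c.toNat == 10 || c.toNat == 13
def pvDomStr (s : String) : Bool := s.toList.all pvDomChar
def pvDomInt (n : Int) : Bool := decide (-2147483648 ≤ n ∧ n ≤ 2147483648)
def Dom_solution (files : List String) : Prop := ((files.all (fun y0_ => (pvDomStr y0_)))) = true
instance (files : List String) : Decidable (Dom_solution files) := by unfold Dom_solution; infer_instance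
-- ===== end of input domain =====

-- B replaces A's index-and-slice state machine (and its string reconstruction via join)
-- by a single left-to-right consumption of each filename that precomputes the sort key
-- and returns the ORIGINAL string after a decorate-sort-undecorate; objective: simpler.

-- ===== PORT A =====
-- inner loop 'for j in range(len(number)): if not number[j].isdigit(): tail = number[j:]; number = number[:j]; break'
def aTailScan (number : List Char) (js : List Int) : List Char × List Char :=
  match js with
  | [] => (number, [])
  | j :: rest =>
    if !(PySem.Chars.isdigit (PySem.List.pyGetD number j ' ')) then
      (PySem.List.slice number none (some j), PySem.List.slice number (some j) none)
    else aTailScan number rest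

-- outer loop 'for i in range(len(file)): if file[i].isdigit(): … break' (none = no digit, nothing appended)
def aHeadScan (f : List Char) (is : List Int) : Option (List Char × List Char × List Char) :=
  match is with
  | [] => none
  | i :: rest =>
    if PySem.Chars.isdigit (PySem.List.pyGetD f i ' ') then
      let head := PySem.List.slice f none (some i)
      let number := PySem.List.slice f (some i) none
      let nt := aTailScan number (PySem.List.pyRange 0 (number.length : Int) 1)
      some (head, nt.1, nt.2)
    else aHeadScan f rest

def aStep (arr : List (List Char × List Char × List Char)) (file : String) :
    List (List Char × List Char × List Char) :=
  match aHeadScan file.toList (PySem.List.pyRange 0 (file.toList.length : Int) 1) with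
  | some hnt => arr ++ [hnt]
  | none => arr

def solution (files : List String) : List String :=
  let arr := files.foldl aStep []
  -- key=lambda x: (x[0].lower(), int(x[1])); int(x[1]) always succeeds (x[1] is a nonempty digit string), hence getD 0
  let sortArr := PySem.List.sorted2 arr (fun x => PySem.Chars.lower x.1)
      (fun x => (PySem.Int.ofChars? x.2.1).getD 0) false
  sortArr.foldl (fun answer x => answer ++ [String.ofList (x.1 ++ x.2.1 ++ x.2.2)]) []

-- ===== PORT B =====
-- while rest and not rest[0].isdigit(): head += rest[0]; rest = rest[1:]
def bTakeHead (head : List Char) (rest : List Char) : List Char × List Char :=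
  match rest with
  | [] => (head, [])
  | c :: cs => if !PySem.Chars.isdigit c then bTakeHead (head ++ [c]) cs else (head, c :: cs)

-- while rest and rest[0].isdigit(): num += rest[0]; rest = rest[1:]
def bTakeNum (num : List Char) (rest : List Char) : List Char × List Char :=
  match rest with
  | [] => (num, [])
  | c :: cs => if PySem.Chars.isdigit c then bTakeNum (num ++ [c]) cs else (num, c :: cs)

def bStep (parsed : List (List Char × Int × String)) (f : String) :
    List (List Char × Int × String) :=
  match bTakeHead [] f.toList with
  | (_, []) => parsed
  | (head, rest) =>
    -- int(num) always succeeds (num is a nonempty digit string), hence getD 0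
    parsed ++ [(PySem.Chars.lower head, (PySem.Int.ofChars? (bTakeNum [] rest).1).getD 0, f)]

def solution_alt (files : List String) : List String :=
  let parsed := files.foldl bStep []
  let s := PySem.List.sorted2 parsed (fun t => t.1) (fun t => t.2.1) false
  s.map (fun t => t.2.2)

-- ===== PRECONDITION & SPEC =====
def Spec_solution (files : List String) (out : List String) : Prop := out = solution_alt files
instance (files : List String) (out : List String) : Decidable (Spec_solution files out) := by unfold Spec_solution; infer_instance

-- ===== CLAIM (what is proved, stated in full; the proofs are below) =====
def Claim_equal_solution : Prop := ∀ (files : List String), Dom_solution files → Spec_solution files (solution files)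

-- ===== LEMMAS AND PROOFS =====

-- the decoration A's triples carry implicitly: B's stored (key1, key2, original string)
def pvG (x : List Char × List Char × List Char) : List Char × Int × String :=
  (PySem.Chars.lower x.1, (PySem.Int.ofChars? x.2.1).getD 0, String.ofList (x.1 ++ x.2.1 ++ x.2.2))

theorem tw_dw_eq_take_drop {α : Type} {p : α → Bool} :
    ∀ (l : List α) (k : Nat) (hk : k < l.length),
      (∀ c ∈ l.take k, p c = true) → p (l.get ⟨k, hk⟩) = false →
      l.takeWhile p = l.take k ∧ l.dropWhile p = l.drop k := by
  intro l
  induction l with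
  | nil => intro k hk; simp at hk
  | cons c cs ih =>
    intro k hk h1 h2
    cases k with
    | zero =>
      simp only [List.get] at h2
      simp [List.takeWhile_cons, List.dropWhile_cons, h2]
    | succ k =>
      have hc : p c = true := h1 c (by simp [List.take_succ_cons])
      have := ih k (by simpa using hk)
        (fun x hx => h1 x (by simp [List.take_succ_cons, hx])) (by simpa using h2)
      simp [List.takeWhile_cons, List.dropWhile_cons, hc, this.1, this.2]

theorem aTailScan_eq (number : List Char) :
    ∀ (n k : Nat), k + n = number.length →
      (∀ c ∈ number.take k, PySem.Chars.isdigit c = true) →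
      aTailScan number (PySem.List.pyRange (k : Int) (number.length : Int) 1) =
        (number.takeWhile PySem.Chars.isdigit, number.dropWhile PySem.Chars.isdigit) := by
  intro n
  induction n with
  | zero =>
    intro k hk h1
    rw [PySem.List.pyRange_one_eq_nil (by omega)]
    have hall : ∀ c ∈ number, PySem.Chars.isdigit c = true := by
      intro c hc
      exact h1 c (by rw [show k = number.length by omega, List.take_length]; exact hc)
    simp only [aTailScan]
    rw [List.takeWhile_eq_self_iff.mpr hall, List.dropWhile_eq_nil_iff.mpr hall]
  | succ n ih =>
    intro k hk h1
    have hklt : k < number.length := by omega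
    rw [PySem.List.pyRange_one_cons (by omega)]
    simp only [aTailScan, PySem.List.pyGetD_natCast, List.getD_eq_getElem number ' ' hklt]
    by_cases hd : PySem.Chars.isdigit number[k] = true
    · rw [if_neg (by simp [hd])]
      rw [show ((k : Int) + 1) = ((k + 1 : Nat) : Int) by push_cast; ring]
      exact ih (k + 1) (by omega) (by
        intro c hc
        rw [List.take_add_one] at hc
        rcases List.mem_append.mp hc with h | h
        · exact h1 c h
        · rw [List.getElem?_eq_getElem hklt] at h
          simp only [Option.toList_some, List.mem_singleton] at h
          rw [h]; exact hd)
    · rw [if_pos (by simp [hd])]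
      rw [PySem.List.slice_to_natCast, PySem.List.slice_from_natCast]
      have := tw_dw_eq_take_drop number k hklt h1 (by simpa using hd)
      rw [this.1, this.2]

theorem aHeadScan_eq (f : List Char) :
    ∀ (n k : Nat), k + n = f.length →
      (∀ c ∈ f.take k, PySem.Chars.isdigit c = false) →
      aHeadScan f (PySem.List.pyRange (k : Int) (f.length : Int) 1) =
        (if f.dropWhile (fun c => !PySem.Chars.isdigit c) = [] then none
         else some (f.takeWhile (fun c => !PySem.Chars.isdigit c),
            (f.dropWhile (fun c => !PySem.Chars.isdigit c)).takeWhile PySem.Chars.isdigit,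
            (f.dropWhile (fun c => !PySem.Chars.isdigit c)).dropWhile PySem.Chars.isdigit)) := by
  intro n
  induction n with
  | zero =>
    intro k hk h1
    rw [PySem.List.pyRange_one_eq_nil (by omega)]
    have hall : ∀ c ∈ f, (fun c => !PySem.Chars.isdigit c) c = true := by
      intro c hc
      simp only [Bool.not_eq_eq_eq_not, Bool.not_true]
      exact h1 c (by rw [show k = f.length by omega, List.take_length]; exact hc)
    rw [if_pos (List.dropWhile_eq_nil_iff.mpr hall)]
    rfl
  | succ n ih =>
    intro k hk h1
    have hklt : k < f.length := by omega
    rw [PySem.List.pyRange_one_cons (by omega)]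
    simp only [aHeadScan, PySem.List.pyGetD_natCast, List.getD_eq_getElem f ' ' hklt]
    by_cases hd : PySem.Chars.isdigit f[k] = true
    · rw [if_pos hd]
      have htd := tw_dw_eq_take_drop (p := fun c => !PySem.Chars.isdigit c) f k hklt
        (by intro c hc; simp [h1 c hc]) (by simp [hd])
      have hne : f.dropWhile (fun c => !PySem.Chars.isdigit c) ≠ [] := by
        rw [htd.2]; simp [List.drop_eq_nil_iff]; omega
      rw [if_neg hne]
      simp only [PySem.List.slice_to_natCast, PySem.List.slice_from_natCast]
      rw [show ((0 : Int) = ((0 : Nat) : Int)) by simp] at *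
      rw [aTailScan_eq (f.drop k) (f.drop k).length 0 (by omega) (by simp)]
      rw [htd.1, htd.2]
    · rw [if_neg hd]
      exact ih (k + 1) (by omega) (by
        intro c hc
        rw [List.take_add_one] at hc
        rcases List.mem_append.mp hc with h | h
        · exact h1 c h
        · rw [List.getElem?_eq_getElem hklt] at h
          simp only [Option.toList_some, List.mem_singleton] at h
          rw [h]; simpa using hd)

theorem bTakeHead_eq : ∀ (l acc : List Char),
    bTakeHead acc l = (acc ++ l.takeWhile (fun c => !PySem.Chars.isdigit c),
                       l.dropWhile (fun c => !PySem.Chars.isdigit c)) := by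
  intro l
  induction l with
  | nil => intro acc; simp [bTakeHead]
  | cons c cs ih =>
    intro acc
    by_cases hd : PySem.Chars.isdigit c = true
    · simp [bTakeHead, hd]
    · simp only [bTakeHead, List.takeWhile_cons, List.dropWhile_cons]
      simp only [Bool.not_eq_true] at hd
      simp [hd, ih]

theorem bTakeNum_eq : ∀ (l acc : List Char),
    bTakeNum acc l = (acc ++ l.takeWhile PySem.Chars.isdigit,
                      l.dropWhile PySem.Chars.isdigit) := by
  intro l
  induction l with
  | nil => intro acc; simp [bTakeNum]
  | cons c cs ih =>
    intro acc
    by_cases hd : PySem.Chars.isdigit c = true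
    · simp [bTakeNum, hd, ih]
    · simp only [Bool.not_eq_true] at hd
      simp [bTakeNum, hd]

theorem step_eq (acc : List (List Char × List Char × List Char)) (f : String) :
    bStep (acc.map pvG) f = (aStep acc f).map pvG := by
  unfold bStep aStep
  have ha := aHeadScan_eq f.toList f.toList.length 0 (by omega) (by simp)
  rw [show (((0 : Nat) : Int)) = (0 : Int) by simp] at ha
  rw [ha, bTakeHead_eq]
  cases hd : f.toList.dropWhile (fun c => !PySem.Chars.isdigit c) with
  | nil => rfl
  | cons c cs =>
    have h2 : (c :: cs).takeWhile PySem.Chars.isdigit ++ (c :: cs).dropWhile PySem.Chars.isdigit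
        = c :: cs := List.takeWhile_append_dropWhile
    have h3 : f.toList.takeWhile (fun c => !PySem.Chars.isdigit c) ++ (c :: cs) = f.toList := by
      rw [← hd]; exact List.takeWhile_append_dropWhile
    simp [bTakeNum_eq, pvG, List.append_assoc, h2, h3, String.ofList_toList]

theorem build_eq : ∀ (files : List String) (acc : List (List Char × List Char × List Char)),
    files.foldl bStep (acc.map pvG) = (files.foldl aStep acc).map pvG := by
  intro files
  induction files with
  | nil => intro acc; rfl
  | cons f fs ih => intro acc; simp only [List.foldl_cons, step_eq, ih]

theorem insertBy_map {α β : Type} (g : α → β) (bef : β → β → Bool) (x : α) :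
    ∀ (acc : List α),
      PySem.List.insertBy bef (g x) (acc.map g) =
        (PySem.List.insertBy (fun a b => bef (g a) (g b)) x acc).map g := by
  intro acc
  induction acc with
  | nil => simp [PySem.List.insertBy]
  | cons a as ih =>
    simp only [List.map_cons, PySem.List.insertBy]
    by_cases h : bef (g x) (g a) = true
    · simp [h]
    · simp only [Bool.not_eq_true] at h
      simp [h, ih]

theorem foldl_insertBy_map {α β : Type} (g : α → β) (bef : β → β → Bool) :
    ∀ (l : List α) (acc : List α),
      (l.map g).foldl (fun acc x => PySem.List.insertBy bef x acc) (acc.map g) =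
        (l.foldl (fun acc x => PySem.List.insertBy (fun a b => bef (g a) (g b)) x acc) acc).map g := by
  intro l
  induction l with
  | nil => intro acc; rfl
  | cons x xs ih =>
    intro acc
    simp only [List.map_cons, List.foldl_cons]
    rw [insertBy_map, ih]

theorem sorted2_map {α β κ₁ κ₂ : Type} [LT κ₁] [DecidableLT κ₁] [LT κ₂] [DecidableLT κ₂]
    (g : α → β) (k1 : β → κ₁) (k2 : β → κ₂) (l : List α) :
    PySem.List.sorted2 (l.map g) k1 k2 false =
      (PySem.List.sorted2 l (fun x => k1 (g x)) (fun x => k2 (g x)) false).map g := by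
  simpa using foldl_insertBy_map g
    (fun a b => decide (k1 a < k1 b) || !decide (k1 b < k1 a) && decide (k2 a < k2 b)) l []

-- ===== VERDICT (by name: the statement is the Claim_ definition above) =====
theorem solution_spec : Claim_equal_solution := by
  intro files _
  unfold Spec_solution solution solution_alt
  have hparsed : files.foldl bStep [] = (files.foldl aStep []).map pvG := by
    simpa using build_eq files []
  simp only [hparsed, sorted2_map pvG (fun t => t.1) (fun t => t.2.1),
    PySem.List.foldl_append_singleton_eq_map, List.nil_append, List.map_map]
  rfl
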